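-- pv_equiv track=rewrite | github.com/danic2009/git_skool | Module18/09_message/main.py | reverse_each_word
-- ===== SOURCE A (Python) =====
-- def swap(a, b):
--     return b, a
--
-- def reverse_each_word(sentence):
--     list_of_string = [i for i in sentence.split(" ")]
--     Finalresult = ""
--     for eachString in list_of_string:
--         eachString = [x for x in eachString]
--         r = len(eachString) - 1
--         l = 0
--         while l < r:
--             if not (eachString[l].isalpha() or eachString[l].isdigit()):
--                 l += 1
--             elif not (eachString[r].isalpha() or eachString[r].isdigit()):
--                 r -= 1
--             else:
--                 eachString[l], eachString[r] = swap(eachString[l], eachString[r])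
--                 l += 1
--                 r -= 1
--         result = "".join(eachString)
--         Finalresult += (result+" ")
--     return Finalresult
-- ===== SOURCE B (Python) =====
-- def _fix(word):
--     rev = [c for c in word if c.isalpha() or c.isdigit()]
--     rev.reverse()
--     it = iter(rev)
--     out = []
--     for c in word:
--         if c.isalpha() or c.isdigit():
--             out.append(next(it))
--         else:
--             out.append(c)
--     return "".join(out)
--
-- def reverse_each_word(sentence):
--     return "".join(_fix(w) + " " for w in sentence.split(" "))
-- ===== Notes on version B (the rewrite author's own statement) =====
-- stated objective: simpler
-- what changed: Replaces the in-place two-pointer swap loop per word with a collect-reverse-reinject pass: gather the alphanumeric chars, reverse them, and re-insert them at the alphanumeric positions.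
import Mathlib
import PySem

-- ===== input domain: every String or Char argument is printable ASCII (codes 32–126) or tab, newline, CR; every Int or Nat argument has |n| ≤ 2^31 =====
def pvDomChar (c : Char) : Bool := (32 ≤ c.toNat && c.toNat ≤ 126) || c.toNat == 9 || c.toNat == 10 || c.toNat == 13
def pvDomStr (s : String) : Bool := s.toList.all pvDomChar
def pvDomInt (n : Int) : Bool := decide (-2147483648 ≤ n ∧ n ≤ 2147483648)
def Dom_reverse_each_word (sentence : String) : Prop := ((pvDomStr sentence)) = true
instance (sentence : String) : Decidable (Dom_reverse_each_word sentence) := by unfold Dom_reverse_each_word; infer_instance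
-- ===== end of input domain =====

-- B replaces the in-place two-pointer swap per word by a collect-reverse-reinject pass (objective: simpler).

-- `c.isalpha() or c.isdigit()` on a one-character string
def pvAl (c : Char) : Bool := PySem.Chars.isalpha c || PySem.Chars.isdigit c

-- ===== PORT A =====
-- A's inner `while l < r` loop; indices reachable from (0, len-1) are always in range,
-- so the `none` branches (Python IndexError) are unreachable.
def pvLoopA (xs : List Char) (l r : Int) : List Char :=
  if h : l < r then
    match PySem.List.pyGet? xs l, PySem.List.pyGet? xs r with
    | some cl, some cr =>
        if ¬ pvAl cl then pvLoopA xs (l + 1) r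
        else if ¬ pvAl cr then pvLoopA xs l (r - 1)
        else
          -- eachString[l], eachString[r] = swap(eachString[l], eachString[r]);
          -- l, r are nonnegative here, so .toNat is exact
          pvLoopA ((xs.set l.toNat cr).set r.toNat cl) (l + 1) (r - 1)
    | _, _ => xs
  else xs
termination_by (r - l).toNat
decreasing_by all_goals omega

def reverse_each_word (sentence : String) : String :=
  let list_of_string := PySem.Chars.splitOn sentence.toList [' ']
  String.mk (list_of_string.foldl
    (fun acc w => acc ++ pvLoopA w 0 ((w.length : Int) - 1) ++ [' ']) [])

-- ===== PORT B =====
-- the `for c in word` loop of _fix: take the next reversed char at alphanumeric positions.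
-- the iterator never runs dry in practice; the `[]` branch (Python StopIteration) is unreachable.
def pvReinject : List Char → List Char → List Char
  | [], _ => []
  | c :: cs, ys =>
      if pvAl c then
        match ys with
        | y :: ys' => y :: pvReinject cs ys'
        | [] => c :: pvReinject cs []
      else c :: pvReinject cs ys

def pvFixB (w : List Char) : List Char := pvReinject w ((w.filter pvAl).reverse)

def reverse_each_word_alt (sentence : String) : String :=
  String.mk (PySem.Chars.join []
    ((PySem.Chars.splitOn sentence.toList [' ']).map (fun w => pvFixB w ++ [' '])))

-- ===== PRECONDITION & SPEC =====
def Spec_reverse_each_word (sentence : String) (out : String) : Prop := out = reverse_each_word_alt sentence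
instance (sentence : String) (out : String) : Decidable (Spec_reverse_each_word sentence out) := by unfold Spec_reverse_each_word; infer_instance

-- ===== CLAIM (what is proved, stated in full; the proofs are below) =====
def Claim_equal_reverse_each_word : Prop := ∀ (sentence : String), Dom_reverse_each_word sentence → Spec_reverse_each_word sentence (reverse_each_word sentence)

-- ===== LEMMAS AND PROOFS =====



lemma pvReinject_cons_al (c y : Char) (cs ys : List Char) (h : pvAl c) :
    pvReinject (c :: cs) (y :: ys) = y :: pvReinject cs ys := by simp [pvReinject, h]



-- reinject splits over an append of the positions list
lemma pvReinject_append (u v ys : List Char) :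
    pvReinject (u ++ v) ys = pvReinject u ys ++ pvReinject v (ys.drop (u.filter pvAl).length) := by
  induction u generalizing ys with
  | nil => simp [pvReinject]
  | cons c cs ih =>
      by_cases hc : pvAl c
      · cases ys with
        | nil => simp [pvReinject, hc, ih]
        | cons y ys' => simp [pvReinject, hc, ih]
      · simp [pvReinject, hc, ih]

-- with enough supply, extra supply is never touched
lemma pvReinject_supply (u ys zs : List Char) (h : (u.filter pvAl).length ≤ ys.length) :
    pvReinject u (ys ++ zs) = pvReinject u ys := by
  induction u generalizing ys with
  | nil => simp [pvReinject]
  | cons c cs ih =>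
      by_cases hc : pvAl c
      · cases ys with
        | nil => simp [hc] at h
        | cons y ys' =>
            simp [hc] at h
            simp [pvReinject, hc, ih _ h]
      · simp [pvReinject, hc, ih _ (by simpa [hc] using h)]

lemma pvFixB_nil : pvFixB [] = [] := by simp [pvFixB, pvReinject]

lemma pvFixB_single (a : Char) : pvFixB [a] = [a] := by
  by_cases h : pvAl a <;> simp [pvFixB, pvReinject, h]

lemma pvFixB_cons_skip (a : Char) (m : List Char) (h : ¬ pvAl a) :
    pvFixB (a :: m) = a :: pvFixB m := by
  simp [pvFixB, pvReinject, h]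

lemma pvFixB_concat_skip (m : List Char) (b : Char) (h : ¬ pvAl b) :
    pvFixB (m ++ [b]) = pvFixB m ++ [b] := by
  simp only [pvFixB, List.filter_append, List.filter_cons, h, Bool.false_eq_true,
    List.filter_nil, pvReinject_append]
  simp [pvReinject, h]

lemma pvFixB_swap (a b : Char) (t : List Char) (ha : pvAl a) (hb : pvAl b) :
    pvFixB (a :: (t ++ [b])) = b :: pvFixB t ++ [a] := by
  have hfil : ((a :: (t ++ [b])).filter pvAl).reverse
      = b :: (t.filter pvAl).reverse ++ [a] := by
    simp [ha, hb, List.filter_append]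
  have hd : List.drop (List.filter pvAl t).length ((List.filter pvAl t).reverse ++ [a]) = [a] := by
    have hlen : (List.filter pvAl t).length = (List.filter pvAl t).reverse.length := by simp
    rw [hlen, List.drop_left]
  rw [pvFixB, hfil, List.cons_append, pvReinject_cons_al _ _ _ _ ha,
    pvReinject_append, pvReinject_supply t _ [a] (by simp), hd]
  simp [pvFixB, pvReinject, hb]

lemma pvSetMid (p mid s : List Char) (i : Nat) (c : Char) (h : i < mid.length) :
    (p ++ mid ++ s).set (p.length + i) c = p ++ mid.set i c ++ s := by
  rw [List.append_assoc, List.set_append_right _ _ (by omega), Nat.add_sub_cancel_left,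
    List.set_append, if_pos h, ← List.append_assoc]

-- the two-pointer loop acting on the middle region equals collect-reverse-reinject
lemma pvLoopA_bridge (n : Nat) : ∀ (m p s : List Char), m.length = n →
    pvLoopA (p ++ m ++ s) (p.length : Int) ((p.length : Int) + (m.length : Int) - 1)
      = p ++ pvFixB m ++ s := by
  induction n using Nat.strong_induction_on with
  | _ n ih =>
    intro m p s hn
    match m with
    | [] => rw [pvLoopA]; simp [pvFixB_nil]; try omega
    | [a] => rw [pvLoopA]; simp [pvFixB_single]; try omega
    | a :: x :: rest =>
      obtain ⟨t, b, hm⟩ : ∃ t b, x :: rest = t ++ [b] := by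
        rcases (x :: rest).eq_nil_or_concat' with h | ⟨t, b, h⟩
        · exact absurd h (by simp)
        · exact ⟨t, b, h⟩
      rw [hm] at hn ⊢
      · 
        have hm : (a :: (t ++ [b])).length = t.length + 2 := by simp
        have hlr : (p.length : Int) < (p.length : Int) + ((a :: (t ++ [b])).length : Int) - 1 := by
          simp; omega
        have hga : PySem.List.pyGet? (p ++ (a :: (t ++ [b])) ++ s) (p.length : Int) = some a := by
          simp [PySem.List.pyGet?_natCast]
        have hr : (p.length : Int) + ((a :: (t ++ [b])).length : Int) - 1
            = ((p.length + (t.length + 1) : Nat) : Int) := by simp; omega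
        have hgb : PySem.List.pyGet? (p ++ (a :: (t ++ [b])) ++ s)
            ((p.length : Int) + ((a :: (t ++ [b])).length : Int) - 1) = some b := by
          rw [hr, PySem.List.pyGet?_natCast]
          rw [List.getElem?_append_left (by simp)]
          rw [List.getElem?_append_right (by simp)]
          simp
        rw [pvLoopA, dif_pos hlr, hga, hgb]
        dsimp only
        by_cases hA : pvAl a
        · by_cases hB : pvAl b
          · -- swap case
            rw [if_neg (by simp [hA]), if_neg (by simp [hB])]
            have hset : (((p ++ (a :: (t ++ [b])) ++ s).set (p.length : Int).toNat b).set
                ((p.length : Int) + ((a :: (t ++ [b])).length : Int) - 1).toNat a)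
                = (p ++ [b]) ++ t ++ ([a] ++ s) := by
              rw [hr]
              simp only [Int.toNat_natCast]
              have e1 : (p ++ (a :: (t ++ [b])) ++ s).set p.length b
                  = p ++ (b :: (t ++ [b])) ++ s := by
                have := pvSetMid p (a :: (t ++ [b])) s 0 b (by simp)
                simpa using this
              rw [e1, pvSetMid p (b :: (t ++ [b])) s (t.length + 1) a (by simp)]
              have e2 : (b :: (t ++ [b])).set (t.length + 1) a = b :: (t ++ [a]) := by
                rw [List.set_cons_succ, List.set_append_right _ _ (Nat.le_refl _)]
                simp
              rw [e2]
              simp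
            rw [hset]
            have h1 : (p.length : Int) + 1 = (((p ++ [b]).length : Nat) : Int) := by simp
            have h2 : (p.length : Int) + ((a :: (t ++ [b])).length : Int) - 1 - 1
                = (((p ++ [b]).length : Nat) : Int) + (t.length : Int) - 1 := by simp; omega
            rw [h1, h2]
            rw [ih t.length (by simp at hn ⊢; omega) t (p ++ [b]) ([a] ++ s) rfl]
            rw [pvFixB_swap a b t hA hB]
            simp
          · -- right end not alnum
            rw [if_neg (by simp [hA]), if_pos (by simp [hB])]
            have hsplit : p ++ (a :: (t ++ [b])) ++ s = p ++ (a :: t) ++ ([b] ++ s) := by simp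
            have h2 : (p.length : Int) + ((a :: (t ++ [b])).length : Int) - 1 - 1
                = (p.length : Int) + ((a :: t).length : Int) - 1 := by simp; omega
            rw [hsplit, h2, ih (a :: t).length (by simp at hn ⊢; omega) (a :: t) p ([b] ++ s) rfl]
            have e3 : a :: (t ++ [b]) = (a :: t) ++ [b] := by simp
            rw [e3, pvFixB_concat_skip (a :: t) b hB]
            simp
        · -- left end not alnum
          rw [if_pos (by simp [hA])]
          have hsplit : p ++ (a :: (t ++ [b])) ++ s = (p ++ [a]) ++ (t ++ [b]) ++ s := by simp
          have h1 : (p.length : Int) + 1 = (((p ++ [a]).length : Nat) : Int) := by simp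
          have h2 : (p.length : Int) + ((a :: (t ++ [b])).length : Int) - 1
              = (((p ++ [a]).length : Nat) : Int) + ((t ++ [b]).length : Int) - 1 := by simp; omega
          rw [hsplit, h1, h2, ih (t ++ [b]).length (by simp at hn ⊢; omega) (t ++ [b]) (p ++ [a]) s rfl]
          rw [pvFixB_cons_skip a (t ++ [b]) hA]
          simp

lemma pvLoopA_eq_fixB (w : List Char) :
    pvLoopA w 0 ((w.length : Int) - 1) = pvFixB w := by
  have := pvLoopA_bridge w.length w [] [] rfl
  simpa using this

lemma foldl_flatten (g : List Char → List Char) (l : List (List Char)) :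
    ∀ acc, l.foldl (fun a w => a ++ g w ++ [' ']) acc
      = acc ++ (l.map (fun w => g w ++ [' '])).flatten := by
  induction l with
  | nil => simp
  | cons w ws ih => intro acc; simp [List.foldl_cons, ih, List.append_assoc]

lemma pvJoinNilFlatten : ∀ parts : List (List Char), PySem.Chars.join [] parts = parts.flatten
  | [] => PySem.Chars.join_nil []
  | [x] => by rw [PySem.Chars.join_singleton]; simp
  | x :: y :: rest => by
      rw [PySem.Chars.join_cons_cons, pvJoinNilFlatten (y :: rest)]; simp

-- ===== VERDICT (by name: the statement is the Claim_ definition above) =====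
theorem reverse_each_word_spec : Claim_equal_reverse_each_word := by
  intro sentence _
  unfold Spec_reverse_each_word reverse_each_word reverse_each_word_alt
  rw [pvJoinNilFlatten]
  dsimp only
  rw [foldl_flatten (fun w => pvLoopA w 0 ((w.length : Int) - 1))
    (PySem.Chars.splitOn sentence.toList [' ']) []]
  simp only [List.nil_append]
  congr 2
  apply List.map_congr_left
  intro w _
  rw [pvLoopA_eq_fixB]
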